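-- pv_equiv track=rewrite | github.com/csdankim/CS531_Final_Project | sokoban/heuristic.py | manhattan_distance_frontier
-- ===== SOURCE A (Python) =====
-- def manhattan_distance_frontier(frontier):
--     total_md = []
--     for item in range(0,len(frontier)):
--         if isinstance(frontier[item], list):
--             curr_frontier_goals = []
--             curr_frontier_boxes = []
--             for row in range(0,len(frontier[item])):
--                 for column in range(0, len(frontier[item][row])):
--                     if frontier[item][row][column] == '0':
--                         curr_frontier_goals.append(row)
--                         curr_frontier_goals.append(column)
--                     if frontier[item][row][column] == '3':
--                         curr_frontier_boxes.append(row)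
--                         curr_frontier_boxes.append(column)
--             frontier_md = 0
--             for box_evals in range(0, len(curr_frontier_boxes), 2):
--                 best_goal_distance = -1
--                 for goal_evals in range(0, len(curr_frontier_goals), 2):
--                     distance_x = abs(int(curr_frontier_boxes[int(box_evals)]) - int(curr_frontier_goals[int(goal_evals)]))
--                     distance_y = abs(int(curr_frontier_boxes[int(box_evals)+1]) - int(curr_frontier_goals[int(goal_evals)+1]))
--                     curr_goal_md = distance_x + distance_y
--                     if (curr_goal_md < best_goal_distance) or (best_goal_distance is -1):
--                         best_goal_distance = curr_goal_md
--                 # after this loop, the box has been associated with the best distance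
--                 frontier_md = frontier_md + best_goal_distance
--             # after this loop, we have the sum of the best distances
--             total_md.append(frontier_md)
--     return total_md
-- ===== SOURCE B (Python) =====
-- def _pass(g):
--     # one smoothing sweep: out[i] = min over j <= i of g[j] + (i - j)
--     out = []
--     p = None
--     for x in g:
--         p = x if p is None else min(x, p + 1)
--         out.append(p)
--     return out
--
-- def _dt1(g):
--     # exact 1D min-plus distance transform: result[i] = min over j of g[j] + |i - j|
--     f = _pass(g)
--     b = _pass(f[::-1])
--     b.reverse()
--     return b
--
-- def manhattan_distance_frontier(frontier):
--     result = []
--     for grid in frontier: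
--         R = len(grid)
--         W = max((len(row) for row in grid), default=0)
--         INF = R + W + 1
--         rows = [_dt1([0 if c < len(row) and row[c] == '0' else INF for c in range(W)])
--                 for row in grid]
--         cols = [_dt1([rows[r][c] for r in range(R)]) for c in range(W)]
--         total = 0
--         for r, row in enumerate(grid):
--             for c, ch in enumerate(row):
--                 if ch == '3':
--                     v = cols[c][r]
--                     total += v if v < INF else -1
--         result.append(total)
--     return result
-- ===== Notes on version B (the rewrite author's own statement) =====
-- stated objective: alternative
-- what changed: Instead of scanning every goal for every box (A gathers flat coordinate lists and runs a nested box*goal loop), B computes a nearest-goal distance field for the whole grid with a separable two-pass L1 distance transform (row sweeps then column sweeps) and reads each box's distance off the field, with boxes still contributing -1 when there are no goals.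
import Mathlib
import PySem

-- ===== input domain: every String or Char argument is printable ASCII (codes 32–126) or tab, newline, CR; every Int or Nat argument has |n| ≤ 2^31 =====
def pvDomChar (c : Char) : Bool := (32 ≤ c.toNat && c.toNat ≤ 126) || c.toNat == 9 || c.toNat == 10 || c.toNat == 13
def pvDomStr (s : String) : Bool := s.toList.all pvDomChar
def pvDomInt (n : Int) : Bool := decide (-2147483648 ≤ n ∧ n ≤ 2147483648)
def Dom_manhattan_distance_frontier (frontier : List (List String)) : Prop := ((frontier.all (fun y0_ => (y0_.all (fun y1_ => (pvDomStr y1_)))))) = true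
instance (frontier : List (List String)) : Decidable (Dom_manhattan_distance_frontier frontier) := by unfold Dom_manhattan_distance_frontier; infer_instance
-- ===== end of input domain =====

-- B replaces A's per-box scan over all goals by a separable two-pass L1 distance
-- transform over the grid, reading each box's nearest-goal distance off the field
-- (objective: alternative — a genuinely different algorithm of similar measured cost).

-- ===== PORT A =====
def manhattan_distance_frontier (frontier : List (List String)) : List Int :=
  frontier.foldl (fun total_md item =>
    -- isinstance(frontier[item], list) is always True for an element of List (List String)
    let gb : List Int × List Int :=
      (PySem.List.enumerate item).foldl (fun gb rrow =>
        (PySem.List.enumerate rrow.2.toList).foldl (fun gb cc =>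
          let gb := if cc.2 = '0' then (gb.1 ++ [rrow.1, cc.1], gb.2) else gb
          if cc.2 = '3' then (gb.1, gb.2 ++ [rrow.1, cc.1]) else gb) gb) ([], [])
    let frontier_md : Int :=
      (PySem.List.pyRange 0 (gb.2.length : Int) 2).foldl (fun fmd box_evals =>
        let best : Int :=
          (PySem.List.pyRange 0 (gb.1.length : Int) 2).foldl (fun best goal_evals =>
            let dx := |PySem.List.pyGetD gb.2 box_evals 0 - PySem.List.pyGetD gb.1 goal_evals 0|
            let dy := |PySem.List.pyGetD gb.2 (box_evals + 1) 0 - PySem.List.pyGetD gb.1 (goal_evals + 1) 0|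
            let md := dx + dy
            if md < best ∨ best = -1 then md else best) (-1)
        fmd + best) 0
    total_md ++ [frontier_md]) []

-- ===== PORT B =====
-- one smoothing sweep of _pass: out[i] = min over j ≤ i of g[j] + (i - j)
def pvPass (g : List Int) : List Int :=
  (g.foldl (fun (st : Option Int × List Int) x =>
      let p := match st.1 with | none => x | some q => min x (q + 1)
      (some p, st.2 ++ [p])) (none, [])).2

-- _dt1: forward sweep, then a backward sweep done on the reversed list
def pvDt1 (g : List Int) : List Int := (pvPass (pvPass g).reverse).reverse

def manhattan_distance_frontier_alt (frontier : List (List String)) : List Int :=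
  frontier.foldl (fun result grid =>
    let R : Nat := grid.length
    let W : Nat := grid.foldl (fun m row => max m row.length) 0   -- max(len(row) for row), default 0
    let INF : Int := (R : Int) + (W : Int) + 1
    let rows := grid.map (fun row =>
      pvDt1 ((List.range W).map (fun c =>
        if row.toList[c]? = some '0' then 0 else INF)))           -- 0 if c < len(row) and row[c]=='0' else INF
    let cols := (List.range W).map (fun c =>
      pvDt1 ((List.range R).map (fun r => (rows.getD r []).getD c 0)))   -- rows[r][c]; indices always in range
    let total : Int :=
      (PySem.List.enumerate grid).foldl (fun total rrow =>
        (PySem.List.enumerate rrow.2.toList).foldl (fun total cc =>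
          if cc.2 = '3' then
            let v := (cols.getD cc.1.toNat []).getD rrow.1.toNat 0       -- cols[c][r]; indices always in range
            total + (if v < INF then v else -1)
          else total) total) 0
    result ++ [total]) []

-- ===== PRECONDITION & SPEC =====
def Spec_manhattan_distance_frontier (frontier : List (List String)) (out : List Int) : Prop := out = manhattan_distance_frontier_alt frontier
instance (frontier : List (List String)) (out : List Int) : Decidable (Spec_manhattan_distance_frontier frontier out) := by unfold Spec_manhattan_distance_frontier; infer_instance

-- ===== CLAIM (what is proved, stated in full; the proofs are below) =====
def Claim_equal_manhattan_distance_frontier : Prop := ∀ (frontier : List (List String)), Dom_manhattan_distance_frontier frontier → Spec_manhattan_distance_frontier frontier (manhattan_distance_frontier frontier)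

-- ===== LEMMAS AND PROOFS =====

-- ---- minimum over an initial segment of ℕ-indexed Int values ----
def pvMinIdx (f : ℕ → Int) : ℕ → Int
  | 0 => f 0
  | i+1 => min (pvMinIdx f i) (f (i+1))

theorem pvMinIdx_le (f : ℕ → Int) {i j : ℕ} (h : j ≤ i) : pvMinIdx f i ≤ f j := by
  induction i with
  | zero => simp_all [pvMinIdx]
  | succ k ih =>
    rcases Nat.lt_succ_iff_lt_or_eq.mp (Nat.lt_succ_of_le h) with h' | h'
    · exact le_trans (min_le_left _ _) (ih (Nat.lt_succ_iff.mp h'))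
    · subst h'; exact min_le_right _ _

theorem pvMinIdx_exists (f : ℕ → Int) (i : ℕ) : ∃ j, j ≤ i ∧ pvMinIdx f i = f j := by
  induction i with
  | zero => exact ⟨0, le_refl 0, rfl⟩
  | succ k ih =>
    rcases ih with ⟨j, hj, hv⟩
    rcases le_total (pvMinIdx f k) (f (k+1)) with h | h
    · exact ⟨j, le_trans hj (Nat.le_succ k), by
        show min (pvMinIdx f k) (f (k+1)) = f j
        rw [min_eq_left h, hv]⟩
    · exact ⟨k+1, le_refl _, by
        show min (pvMinIdx f k) (f (k+1)) = f (k+1)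
        rw [min_eq_right h]⟩

theorem pvMinIdx_congr {f g : ℕ → Int} {i : ℕ} (h : ∀ j ≤ i, f j = g j) :
    pvMinIdx f i = pvMinIdx g i := by
  induction i with
  | zero => exact h 0 (le_refl 0)
  | succ k ih =>
    simp [pvMinIdx, ih (fun j hj => h j (le_trans hj (Nat.le_succ k))), h (k+1) (le_refl _)]

theorem pvMinIdx_cons (f : ℕ → Int) (i : ℕ) :
    pvMinIdx f (i+1) = min (f 0) (pvMinIdx (fun j => f (j+1)) i) := by
  induction i with
  | zero => simp [pvMinIdx]
  | succ k ih =>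
    show min (pvMinIdx f (k+1)) (f (k+2)) = _
    rw [ih]
    simp [pvMinIdx, min_assoc]

-- ---- structural characterisation of pvPass ----
def pvPassFrom (p : Int) : List Int → List Int
  | [] => []
  | x :: xs => min x (p+1) :: pvPassFrom (min x (p+1)) xs

def pvLastSt (p : Int) : List Int → Int
  | [] => p
  | x :: xs => pvLastSt (min x (p+1)) xs

theorem pvPass_foldl_aux (xs : List Int) (p : Int) (acc : List Int) :
    (xs.foldl (fun (st : Option Int × List Int) x =>
      let q := match st.1 with | none => x | some q => min x (q + 1)
      (some q, st.2 ++ [q])) (some p, acc)) = (some (pvLastSt p xs), acc ++ pvPassFrom p xs) := by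
  induction xs generalizing p acc with
  | nil => simp [pvLastSt, pvPassFrom]
  | cons x xs ih => simp [List.foldl_cons, ih, pvLastSt, pvPassFrom]

theorem pvPass_cons (x : Int) (xs : List Int) : pvPass (x :: xs) = x :: pvPassFrom x xs := by
  simp [pvPass, List.foldl_cons, pvPass_foldl_aux]

theorem pvPassFrom_length (p : Int) (xs : List Int) : (pvPassFrom p xs).length = xs.length := by
  induction xs generalizing p with
  | nil => rfl
  | cons x xs ih => simp [pvPassFrom, ih]

theorem pvPass_length (g : List Int) : (pvPass g).length = g.length := by
  cases g with
  | nil => rfl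
  | cons x xs => simp [pvPass_cons, pvPassFrom_length]

def pvPref (g : List Int) (i : ℕ) : Int := pvMinIdx (fun j => g.getD j 0 + ((i:Int) - (j:Int))) i

theorem pvPref_cons (x : Int) (xs : List Int) (i : ℕ) :
    pvPref (x :: xs) (i+1) = min (x + (i:Int) + 1) (pvPref xs i) := by
  unfold pvPref
  rw [pvMinIdx_cons]
  congr 1
  · simp only [List.getD_cons_zero]; push_cast; ring
  · apply pvMinIdx_congr
    intro j _
    push_cast
    simp only [List.getD_cons_succ]
    ring

theorem pvPassFrom_getD (g : List Int) (p : Int) (i : ℕ) (h : i < g.length) :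
    (pvPassFrom p g).getD i 0 = min (p + 1 + (i:Int)) (pvPref g i) := by
  induction g generalizing p i with
  | nil => simp at h
  | cons x xs ih =>
    cases i with
    | zero =>
      simp [pvPassFrom, pvPref, pvMinIdx, min_comm]
    | succ i =>
      have h' : i < xs.length := by simpa using h
      have hx := ih (min x (p+1)) i h'
      simp only [pvPassFrom, List.getD_cons_succ] at hx ⊢
      rw [hx, pvPref_cons]
      set t := pvPref xs i with ht
      push_cast
      omega

theorem pvPass_getD (g : List Int) (i : ℕ) (h : i < g.length) :
    (pvPass g).getD i 0 = pvPref g i := by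
  cases g with
  | nil => simp at h
  | cons x xs =>
    rw [pvPass_cons]
    cases i with
    | zero => simp [pvPref, pvMinIdx]
    | succ i =>
      have h' : i < xs.length := by simpa using h
      simp only [List.getD_cons_succ]
      rw [pvPassFrom_getD xs x i h', pvPref_cons]
      set t := pvPref xs i with ht
      omega

def pvMinAll (g : List Int) (i : ℕ) : Int :=
  pvMinIdx (fun j => g.getD j 0 + |(i:Int) - (j:Int)|) (g.length - 1)

theorem pvGetD_reverse (l : List Int) (i : ℕ) (h : i < l.length) :
    l.reverse.getD i 0 = l.getD (l.length - 1 - i) 0 := by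
  simp [List.getD, List.getElem?_reverse h]

theorem pvDt1_getD (g : List Int) (i : ℕ) (h : i < g.length) :
    (pvDt1 g).getD i 0 = pvMinAll g i := by
  set n := g.length with hn
  have hn0 : 0 < n := by omega
  have hlf : (pvPass g).length = n := pvPass_length g
  have hlr : ((pvPass g).reverse).length = n := by simp [hlf]
  set m := n - 1 - i with hm
  have hV : (pvDt1 g).getD i 0 = pvPref (pvPass g).reverse m := by
    unfold pvDt1
    rw [pvGetD_reverse _ i (by rw [pvPass_length, hlr]; exact h)]
    rw [pvPass_length, hlr]
    exact pvPass_getD _ m (by rw [hlr]; omega)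
  have hrevget : ∀ j, j ≤ m → (pvPass g).reverse.getD j 0 = pvPref g (n - 1 - j) := by
    intro j hj
    rw [pvGetD_reverse _ j (by rw [hlf]; omega), hlf]
    exact pvPass_getD g (n - 1 - j) (by omega)
  rw [hV]
  apply le_antisymm
  · -- the transformed value is below every g[k] + |i-k|
    obtain ⟨k, hk, hkeq⟩ := pvMinIdx_exists (fun j => g.getD j 0 + |(i:Int) - (j:Int)|) (n-1)
    have hmin : pvMinAll g i = g.getD k 0 + |(i:Int) - (k:Int)| := hkeq
    rw [hmin]
    by_cases hik : i ≤ k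
    · have hj : n-1-k ≤ m := by omega
      have h1 : pvPref (pvPass g).reverse m ≤
          (pvPass g).reverse.getD (n-1-k) 0 + ((m:Int) - ((n-1-k : ℕ):Int)) :=
        pvMinIdx_le _ hj
      rw [hrevget _ hj] at h1
      have he : n-1-(n-1-k) = k := by omega
      rw [he] at h1
      have h2 : pvPref g k ≤ g.getD k 0 + ((k:Int) - (k:Int)) := pvMinIdx_le _ (le_refl k)
      have habs : |(i:Int) - (k:Int)| = (k:Int) - (i:Int) := by
        rw [abs_sub_comm]
        exact abs_of_nonneg (by omega)
      rw [habs]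
      set a := pvPref (pvPass g).reverse m
      set b := pvPref g k
      set c := g.getD k 0
      omega
    · have h1 : pvPref (pvPass g).reverse m ≤
          (pvPass g).reverse.getD m 0 + ((m:Int) - (m:Int)) := pvMinIdx_le _ (le_refl m)
      rw [hrevget m (le_refl m)] at h1
      have he : n-1-m = i := by omega
      rw [he] at h1
      have h2 : pvPref g i ≤ g.getD k 0 + ((i:Int) - (k:Int)) := pvMinIdx_le _ (by omega)
      have habs : |(i:Int) - (k:Int)| = (i:Int) - (k:Int) :=
        abs_of_nonneg (by omega)
      rw [habs]
      set a := pvPref (pvPass g).reverse m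
      set b := pvPref g i
      set c := g.getD k 0
      omega
  · -- every value of the transform is one of the g[k] + (…) ≥ min
    obtain ⟨j, hj, hjeq⟩ := pvMinIdx_exists
      (fun j => (pvPass g).reverse.getD j 0 + ((m:Int) - (j:Int))) m
    have hje : pvPref (pvPass g).reverse m =
        (pvPass g).reverse.getD j 0 + ((m:Int) - (j:Int)) := hjeq
    rw [hrevget j hj] at hje
    obtain ⟨k, hk, hkeq⟩ := pvMinIdx_exists
      (fun k => g.getD k 0 + (((n-1-j : ℕ):Int) - (k:Int))) (n-1-j)
    have hke : pvPref g (n-1-j) = g.getD k 0 + (((n-1-j : ℕ):Int) - (k:Int)) := hkeq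
    have h3 : pvMinAll g i ≤ g.getD k 0 + |(i:Int) - (k:Int)| := pvMinIdx_le _ (by omega)
    have habs2 : |(i:Int) - (k:Int)| ≤ (((n-1-j : ℕ):Int) - (k:Int)) + (((n-1-j : ℕ):Int) - (i:Int)) := by
      rw [abs_sub_le_iff]
      constructor <;> omega
    have hc : (((n-1-j : ℕ):Int) - (i:Int)) = ((m:Int) - (j:Int)) := by omega
    rw [hc] at habs2
    set a := pvMinAll g i
    set b := pvPref (pvPass g).reverse m
    set c := g.getD k 0
    set d := pvPref g (n-1-j)
    omega

-- ---- coordinates of the cells holding a given character ----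
def pvIdxF (ch : Char) : List Char → ℕ → List ℕ
  | [], _ => []
  | x :: xs, c => if x = ch then c :: pvIdxF ch xs (c+1) else pvIdxF ch xs (c+1)

def pvCellsFrom (ch : Char) : List String → ℕ → List (ℕ × ℕ)
  | [], _ => []
  | row :: rest, r => (pvIdxF ch row.toList 0).map (fun c => (r, c)) ++ pvCellsFrom ch rest (r+1)

def pvCells (ch : Char) (grid : List String) : List (ℕ × ℕ) := pvCellsFrom ch grid 0

theorem pvIdxF_mem (ch : Char) (l : List Char) (k c : ℕ) :
    c ∈ pvIdxF ch l k ↔ ∃ j, j < l.length ∧ l[j]? = some ch ∧ c = k + j := by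
  induction l generalizing k with
  | nil => simp [pvIdxF]
  | cons x xs ih =>
    constructor
    · intro hc
      by_cases hx : x = ch
      · simp only [pvIdxF, if_pos hx, List.mem_cons] at hc
        rcases hc with hc | hc
        · exact ⟨0, by simp [hx, hc]⟩
        · rcases (ih (k+1)).mp hc with ⟨j, hj, hg, he⟩
          exact ⟨j+1, by simpa using hj, by simpa using hg, by omega⟩
      · simp only [pvIdxF, if_neg hx] at hc
        rcases (ih (k+1)).mp hc with ⟨j, hj, hg, he⟩
        exact ⟨j+1, by simpa using hj, by simpa using hg, by omega⟩
    · rintro ⟨j, hj, hg, rfl⟩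
      cases j with
      | zero =>
        simp only [List.getElem?_cons_zero, Option.some.injEq] at hg
        simp [pvIdxF, hg]
      | succ j =>
        have hm := (ih (k+1)).mpr ⟨j, by simpa using hj, by simpa using hg, by omega⟩
        by_cases hx : x = ch
        · simp only [pvIdxF, if_pos hx, List.mem_cons]
          right
          exact hm
        · simp only [pvIdxF, if_neg hx]
          exact hm

theorem pvCellsFrom_mem (ch : Char) (grid : List String) (k r c : ℕ) :
    (r, c) ∈ pvCellsFrom ch grid k ↔
      k ≤ r ∧ r - k < grid.length ∧ (grid.getD (r - k) "").toList[c]? = some ch := by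
  induction grid generalizing k with
  | nil => simp [pvCellsFrom]
  | cons row rest ih =>
    simp only [pvCellsFrom, List.mem_append, List.mem_map, ih (k+1)]
    constructor
    · rintro (⟨c', hc', he⟩ | ⟨h1, h2, h3⟩)
      · injection he with he1 he2
        rcases (pvIdxF_mem ch row.toList 0 c').mp hc' with ⟨j, hj, hg, hje⟩
        have h0 : r - k = 0 := by omega
        refine ⟨by omega, by simp [h0], ?_⟩
        rw [h0]
        simp only [List.getD_cons_zero]
        subst hje
        rw [← he2]
        simpa using hg
      · refine ⟨by omega, by simp only [List.length_cons]; omega, ?_⟩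
        have hr : r - k = (r - (k+1)) + 1 := by omega
        rw [hr]
        simpa using h3
    · rintro ⟨h1, h2, h3⟩
      rcases Nat.eq_or_lt_of_le h1 with he | hlt
      · left
        subst he
        simp only [Nat.sub_self, List.getD_cons_zero] at h2 h3
        obtain ⟨hlen, -⟩ := List.getElem?_eq_some_iff.mp h3
        exact ⟨c, (pvIdxF_mem ch row.toList 0 c).mpr ⟨c, hlen, h3, by omega⟩, rfl⟩
      · right
        have hr : r - k = (r - (k+1)) + 1 := by omega
        rw [hr] at h2 h3
        exact ⟨by omega, by simpa using h2, by simpa using h3⟩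

theorem pvCells_mem (ch : Char) (grid : List String) (r c : ℕ) :
    (r, c) ∈ pvCells ch grid ↔
      r < grid.length ∧ (grid.getD r "").toList[c]? = some ch := by
  unfold pvCells
  rw [pvCellsFrom_mem]
  simp

-- ---- A's per-box best-goal fold, and the common per-grid value ----
def pvDist (b g : ℕ × ℕ) : Int := |(b.1:Int) - (g.1:Int)| + |(b.2:Int) - (g.2:Int)|

def pvBest (goals : List (ℕ × ℕ)) (b : ℕ × ℕ) : Int :=
  goals.foldl (fun best gl =>
    if pvDist b gl < best ∨ best = -1 then pvDist b gl else best) (-1)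

def pvSval (grid : List String) : Int :=
  (pvCells '3' grid).foldl (fun s bx => s + pvBest (pvCells '0' grid) bx) 0

theorem pvDist_nonneg (b g : ℕ × ℕ) : 0 ≤ pvDist b g := by
  unfold pvDist
  positivity

theorem pvBest_fold_min (gs : List (ℕ × ℕ)) (b : ℕ × ℕ) (best : Int) (h : 0 ≤ best) :
    gs.foldl (fun best gl => if pvDist b gl < best ∨ best = -1 then pvDist b gl else best) best
      = gs.foldl (fun m gl => min m (pvDist b gl)) best := by
  induction gs generalizing best with
  | nil => rfl
  | cons g gs ih =>
    simp only [List.foldl_cons]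
    have hd := pvDist_nonneg b g
    by_cases hlt : pvDist b g < best
    · rw [if_pos (Or.inl hlt), min_eq_right (le_of_lt hlt)]
      exact ih _ hd
    · rw [if_neg (by push Not; exact ⟨not_lt.mp hlt, by omega⟩), min_eq_left (by omega)]
      exact ih _ h

-- pvBest is the plain minimum of the distances once the -1 sentinel is replaced
theorem pvBest_cons (g : ℕ × ℕ) (gs : List (ℕ × ℕ)) (b : ℕ × ℕ) :
    pvBest (g :: gs) b = gs.foldl (fun m gl => min m (pvDist b gl)) (pvDist b g) := by
  unfold pvBest
  simp only [List.foldl_cons, or_true, if_true]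
  exact pvBest_fold_min gs b _ (pvDist_nonneg b g)

-- ---- the flattened coordinate lists A builds, and its stride-2 index loop ----
def pvFlat (ps : List (ℕ × ℕ)) : List Int := ps.flatMap (fun p => [(p.1:Int), (p.2:Int)])

theorem pvFlat_length (ps : List (ℕ × ℕ)) : (pvFlat ps).length = 2 * ps.length := by
  induction ps with
  | nil => rfl
  | cons p ps ih => simp [pvFlat, List.flatMap_cons] at ih ⊢; omega

theorem pvFlat_getD_even (ps : List (ℕ × ℕ)) (k : ℕ) (h : k < ps.length) :
    (pvFlat ps).getD (2*k) 0 = ((ps.getD k (0,0)).1 : Int) := by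
  induction ps generalizing k with
  | nil => simp at h
  | cons p ps ih =>
    cases k with
    | zero => simp [pvFlat, List.flatMap_cons]
    | succ k =>
      have h' : k < ps.length := by simpa using h
      have he : 2*(k+1) = (2*k)+1+1 := by omega
      simp only [pvFlat, List.flatMap_cons, he, List.cons_append, List.getD_cons_succ,
        List.nil_append]
      exact ih k h'

theorem pvFlat_getD_odd (ps : List (ℕ × ℕ)) (k : ℕ) (h : k < ps.length) :
    (pvFlat ps).getD (2*k+1) 0 = ((ps.getD k (0,0)).2 : Int) := by
  induction ps generalizing k with
  | nil => simp at h
  | cons p ps ih =>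
    cases k with
    | zero => simp [pvFlat, List.flatMap_cons]
    | succ k =>
      have h' : k < ps.length := by simpa using h
      have he : 2*(k+1)+1 = ((2*k)+1)+1+1 := by omega
      simp only [pvFlat, List.flatMap_cons, he, List.cons_append, List.getD_cons_succ,
        List.nil_append]
      exact ih k h'

theorem pvRange2 (n : ℕ) :
    PySem.List.pyRange 0 (2*(n:Int)) 2 = (List.range n).map (fun (k:ℕ) => 2*(k:Int)) := by
  rw [PySem.List.pyRange_of_pos _ _ (by norm_num)]
  have h1 : ((2*(n:Int) - 0 + 2 - 1)/2).toNat = n := by omega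
  rcases Nat.eq_zero_or_pos n with rfl | hn
  · simp
  · rw [if_pos (by omega), h1]
    apply List.map_congr_left
    intro k _
    ring

theorem pvFoldl_range_getD {α β : Type} (ps : List α) (d : α) (G : β → α → β) (init : β) :
    (List.range ps.length).foldl (fun a k => G a (ps.getD k d)) init = ps.foldl G init := by
  induction ps generalizing init with
  | nil => simp
  | cons p ps ih =>
    simp only [List.length_cons, List.range_succ_eq_map, List.foldl_cons, List.foldl_map,
      List.getD_cons_zero, Nat.succ_eq_add_one, List.getD_cons_succ]
    exact ih (G init p)

theorem pvStep2 (ps : List (ℕ × ℕ)) (F : Int → Int → Int → Int) (init : Int) :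
    (PySem.List.pyRange 0 ((pvFlat ps).length : Int) 2).foldl
      (fun a i => F a (PySem.List.pyGetD (pvFlat ps) i 0) (PySem.List.pyGetD (pvFlat ps) (i+1) 0)) init
    = ps.foldl (fun a p => F a (p.1:Int) (p.2:Int)) init := by
  have hl : ((pvFlat ps).length : Int) = 2*(ps.length:Int) := by
    rw [pvFlat_length]; push_cast; ring
  rw [hl, pvRange2, List.foldl_map]
  have hcg : ∀ (a : Int), ∀ k ∈ List.range ps.length,
      F a (PySem.List.pyGetD (pvFlat ps) (2*(k:Int)) 0)
          (PySem.List.pyGetD (pvFlat ps) (2*(k:Int)+1) 0)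
        = F a ((ps.getD k (0,0)).1 : Int) ((ps.getD k (0,0)).2 : Int) := by
    intro a k hk
    rw [List.mem_range] at hk
    have e1 : (2*(k:Int)) = ((2*k : ℕ) : Int) := by push_cast; ring
    have e2 : (2*(k:Int)+1) = ((2*k+1 : ℕ) : Int) := by push_cast; ring
    rw [e2, e1, PySem.List.pyGetD_natCast, PySem.List.pyGetD_natCast,
      pvFlat_getD_even ps k hk, pvFlat_getD_odd ps k hk]
  rw [PySem.List.foldl_congr_mem _ _ _ init hcg]
  exact pvFoldl_range_getD ps (0,0) (fun a p => F a (p.1:Int) (p.2:Int)) init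

-- ---- A's coordinate-gathering loops produce the flattened cell lists ----
theorem pvGatherRow (l : List Char) (k : ℕ) (r : Int) (acc1 acc2 : List Int) :
    (PySem.List.enumerate l (k:Int)).foldl (fun gb cc =>
        let gb := if cc.2 = '0' then (gb.1 ++ [r, cc.1], gb.2) else gb
        if cc.2 = '3' then (gb.1, gb.2 ++ [r, cc.1]) else gb) (acc1, acc2)
      = (acc1 ++ (pvIdxF '0' l k).flatMap (fun (c:ℕ) => [r, (c:Int)]),
         acc2 ++ (pvIdxF '3' l k).flatMap (fun (c:ℕ) => [r, (c:Int)])) := by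
  induction l generalizing k acc1 acc2 with
  | nil => simp [pvIdxF]
  | cons x xs ih =>
    rw [PySem.List.enumerate_cons]
    have hk1 : (k:Int) + 1 = ((k+1 : ℕ) : Int) := by push_cast; ring
    simp only [List.foldl_cons, hk1]
    by_cases h0 : x = '0'
    · have h3 : ¬ x = '3' := by simp [h0]
      simp only [h0, if_pos rfl, if_neg (by simp : ¬ ('0':Char) = '3')]
      rw [ih (k+1)]
      simp [pvIdxF, h0, List.flatMap_cons]
    · by_cases h3 : x = '3'
      · simp only [h3, if_neg (by simp : ¬ ('3':Char) = '0'), if_pos rfl]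
        rw [ih (k+1)]
        simp [pvIdxF, h3, List.flatMap_cons]
      · simp only [if_neg h0, if_neg h3]
        rw [ih (k+1)]
        simp [pvIdxF, h0, h3]

theorem pvGatherGrid (grid : List String) (k : ℕ) (acc1 acc2 : List Int) :
    (PySem.List.enumerate grid (k:Int)).foldl (fun gb rrow =>
        (PySem.List.enumerate rrow.2.toList).foldl (fun gb cc =>
          let gb := if cc.2 = '0' then (gb.1 ++ [rrow.1, cc.1], gb.2) else gb
          if cc.2 = '3' then (gb.1, gb.2 ++ [rrow.1, cc.1]) else gb) gb) (acc1, acc2)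
      = (acc1 ++ pvFlat (pvCellsFrom '0' grid k),
         acc2 ++ pvFlat (pvCellsFrom '3' grid k)) := by
  induction grid generalizing k acc1 acc2 with
  | nil => simp [pvCellsFrom, pvFlat]
  | cons row rest ih =>
    rw [PySem.List.enumerate_cons]
    have hk1 : (k:Int) + 1 = ((k+1 : ℕ) : Int) := by push_cast; ring
    simp only [List.foldl_cons, hk1]
    have h0 : ((0:ℕ):Int) = 0 := by norm_num
    rw [show (PySem.List.enumerate row.toList 0) = (PySem.List.enumerate row.toList ((0:ℕ):Int)) by rw [h0]]
    rw [pvGatherRow row.toList 0 (k:Int) acc1 acc2, ih (k+1)]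
    have hflat : ∀ ch, pvFlat (pvCellsFrom ch (row :: rest) k)
        = (pvIdxF ch row.toList 0).flatMap (fun (c:ℕ) => [(k:Int), (c:Int)])
          ++ pvFlat (pvCellsFrom ch rest (k+1)) := by
      intro ch
      simp only [pvCellsFrom, pvFlat, List.flatMap_append, List.flatMap_map]
    rw [hflat '0', hflat '3']
    simp [List.append_assoc]

-- the per-item value A computes (A's outer-loop body, with the gathered pair explicit)
def pvAvalBody (gb : List Int × List Int) : Int :=
  (PySem.List.pyRange 0 (gb.2.length : Int) 2).foldl (fun fmd box_evals =>
    fmd + (PySem.List.pyRange 0 (gb.1.length : Int) 2).foldl (fun best goal_evals =>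
      if |PySem.List.pyGetD gb.2 box_evals 0 - PySem.List.pyGetD gb.1 goal_evals 0|
          + |PySem.List.pyGetD gb.2 (box_evals + 1) 0 - PySem.List.pyGetD gb.1 (goal_evals + 1) 0| < best ∨ best = -1
        then |PySem.List.pyGetD gb.2 box_evals 0 - PySem.List.pyGetD gb.1 goal_evals 0|
          + |PySem.List.pyGetD gb.2 (box_evals + 1) 0 - PySem.List.pyGetD gb.1 (goal_evals + 1) 0|
        else best) (-1)) 0

def pvAval (item : List String) : Int :=
  pvAvalBody ((PySem.List.enumerate item).foldl (fun gb rrow =>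
    (PySem.List.enumerate rrow.2.toList).foldl (fun gb cc =>
      let gb := if cc.2 = '0' then (gb.1 ++ [rrow.1, cc.1], gb.2) else gb
      if cc.2 = '3' then (gb.1, gb.2 ++ [rrow.1, cc.1]) else gb) gb) ([], []))

theorem pvAval_eq (item : List String) : pvAval item = pvSval item := by
  unfold pvAval
  have h0 : ((0:ℕ):Int) = 0 := by norm_num
  rw [show (PySem.List.enumerate item) = (PySem.List.enumerate item ((0:ℕ):Int)) by rw [h0],
    pvGatherGrid item 0 [] []]
  simp only [List.nil_append]
  show pvAvalBody (pvFlat (pvCells '0' item), pvFlat (pvCells '3' item)) = _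
  unfold pvAvalBody
  simp only
  rw [pvStep2 (pvCells '3' item) (fun fmd b1 b2 =>
    fmd + (PySem.List.pyRange 0 ((pvFlat (pvCells '0' item)).length : Int) 2).foldl (fun best goal_evals =>
      if |b1 - PySem.List.pyGetD (pvFlat (pvCells '0' item)) goal_evals 0|
          + |b2 - PySem.List.pyGetD (pvFlat (pvCells '0' item)) (goal_evals + 1) 0| < best ∨ best = -1
        then |b1 - PySem.List.pyGetD (pvFlat (pvCells '0' item)) goal_evals 0|
          + |b2 - PySem.List.pyGetD (pvFlat (pvCells '0' item)) (goal_evals + 1) 0| else best) (-1)) 0]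
  have hinner : ∀ b1 b2 : Int,
      (PySem.List.pyRange 0 ((pvFlat (pvCells '0' item)).length : Int) 2).foldl (fun best goal_evals =>
        if |b1 - PySem.List.pyGetD (pvFlat (pvCells '0' item)) goal_evals 0|
            + |b2 - PySem.List.pyGetD (pvFlat (pvCells '0' item)) (goal_evals + 1) 0| < best ∨ best = -1
          then |b1 - PySem.List.pyGetD (pvFlat (pvCells '0' item)) goal_evals 0|
            + |b2 - PySem.List.pyGetD (pvFlat (pvCells '0' item)) (goal_evals + 1) 0| else best) (-1)
      = (pvCells '0' item).foldl (fun best p =>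
          if |b1 - (p.1:Int)| + |b2 - (p.2:Int)| < best ∨ best = -1
            then |b1 - (p.1:Int)| + |b2 - (p.2:Int)| else best) (-1) := by
    intro b1 b2
    exact pvStep2 (pvCells '0' item) (fun best g1 g2 =>
      if |b1 - g1| + |b2 - g2| < best ∨ best = -1 then |b1 - g1| + |b2 - g2| else best) (-1)
  simp only [hinner]
  rfl

-- ===== A-side: the port of A computes map pvSval =====
theorem A_eq_sval (frontier : List (List String)) :
    manhattan_distance_frontier frontier = frontier.map pvSval := by
  have h1 : manhattan_distance_frontier frontier
      = frontier.foldl (fun acc item => acc ++ [pvAval item]) [] := rfl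
  rw [h1, PySem.List.foldl_append_singleton_eq_map, List.nil_append]
  exact List.map_congr_left (fun item _ => pvAval_eq item)

-- ===== B-side: named pieces of B's per-grid computation =====
def pvW (grid : List String) : ℕ := grid.foldl (fun m row => max m row.length) 0
def pvINF (grid : List String) : Int := (grid.length : Int) + (pvW grid : Int) + 1
def pvRows (grid : List String) : List (List Int) :=
  grid.map (fun row => pvDt1 ((List.range (pvW grid)).map (fun c =>
    if row.toList[c]? = some '0' then 0 else pvINF grid)))
def pvCols (grid : List String) : List (List Int) :=
  (List.range (pvW grid)).map (fun c =>
    pvDt1 ((List.range grid.length).map (fun r => ((pvRows grid).getD r []).getD c 0)))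

def pvBval (grid : List String) : Int :=
  (PySem.List.enumerate grid).foldl (fun total rrow =>
    (PySem.List.enumerate rrow.2.toList).foldl (fun total cc =>
      if cc.2 = '3' then
        total + (if ((pvCols grid).getD cc.1.toNat []).getD rrow.1.toNat 0 < pvINF grid
          then ((pvCols grid).getD cc.1.toNat []).getD rrow.1.toNat 0 else -1)
      else total) total) 0

def pvBase (grid : List String) (r c : ℕ) : Int :=
  if (grid.getD r "").toList[c]? = some '0' then 0 else pvINF grid

def pvD (grid : List String) (r c : ℕ) : Int :=
  pvMinIdx (fun r' => pvMinIdx (fun c' => pvBase grid r' c' + |(c:Int) - (c':Int)|) (pvW grid - 1)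
    + |(r:Int) - (r':Int)|) (grid.length - 1)

theorem pvGetD_map {α β : Type} (l : List α) (f : α → β) (n : ℕ) (h : n < l.length)
    (d : α) (dβ : β) : (l.map f).getD n dβ = f (l.getD n d) := by
  simp [List.getD, List.getElem?_map, List.getElem?_eq_getElem h]

theorem pvRowLen_le_W (grid : List String) (r : ℕ) (h : r < grid.length) :
    (grid.getD r "").length ≤ pvW grid := by
  have hmem : grid.getD r "" ∈ grid := by
    rw [List.getD_eq_getElem grid "" h]
    exact List.getElem_mem h
  exact (PySem.List.le_foldl_max_nat grid (fun row => row.length) 0).2 _ hmem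

-- evaluating cols[c][r]
theorem pvV_eq (grid : List String) (r c : ℕ) (hr : r < grid.length) (hc : c < pvW grid) :
    ((pvCols grid).getD c []).getD r 0 = pvD grid r c := by
  have hcols : (pvCols grid).getD c []
      = pvDt1 ((List.range grid.length).map (fun r' => ((pvRows grid).getD r' []).getD c 0)) :=
    PySem.List.getD_map_range _ _ _ _ hc
  have hlen : ((List.range grid.length).map (fun r' => ((pvRows grid).getD r' []).getD c 0)).length
      = grid.length := by simp
  rw [hcols, pvDt1_getD _ r (by rw [hlen]; exact hr)]
  unfold pvMinAll pvD
  rw [hlen]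
  apply pvMinIdx_congr
  intro r' hr'
  have hr'' : r' < grid.length := by omega
  congr 1
  rw [PySem.List.getD_map_range _ _ _ _ hr'']
  have hrow : (pvRows grid).getD r' []
      = pvDt1 ((List.range (pvW grid)).map (fun c' =>
          if (grid.getD r' "").toList[c']? = some '0' then 0 else pvINF grid)) := by
    unfold pvRows
    exact pvGetD_map grid _ r' hr'' "" []
  have hlenW : ((List.range (pvW grid)).map (fun c' =>
      if (grid.getD r' "").toList[c']? = some '0' then 0 else pvINF grid)).length = pvW grid := by
    simp
  rw [hrow, pvDt1_getD _ c (by rw [hlenW]; exact hc)]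
  unfold pvMinAll
  rw [hlenW]
  apply pvMinIdx_congr
  intro c' hc'
  have hc'' : c' < pvW grid := by omega
  rw [PySem.List.getD_map_range _ _ _ _ hc'']
  rfl

theorem pvGoal_lt (grid : List String) (r c : ℕ) (hr : r < grid.length) (hc : c < pvW grid)
    (gl : ℕ × ℕ) (hg : gl ∈ pvCells '0' grid) : pvDist (r, c) gl < pvINF grid := by
  obtain ⟨r1, c1⟩ := gl
  rw [pvCells_mem] at hg
  obtain ⟨hr1, hc1⟩ := hg
  have hlen : c1 < (grid.getD r1 "").toList.length := (List.getElem?_eq_some_iff.mp hc1).1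
  have hW1 : (grid.getD r1 "").length ≤ pvW grid := pvRowLen_le_W grid r1 hr1
  have hWl : (grid.getD r1 "").toList.length = (grid.getD r1 "").length := by simp
  have h1 : |(r:Int) - (r1:Int)| ≤ (grid.length:Int) - 1 := by
    rw [abs_le]; constructor <;> omega
  have h2 : |(c:Int) - (c1:Int)| ≤ ((pvW grid : ℕ):Int) - 1 := by
    rw [abs_le]; constructor <;> omega
  unfold pvDist pvINF
  simp only
  omega

theorem pvD_le (grid : List String) (r c : ℕ) (hr : r < grid.length)
    (gl : ℕ × ℕ) (hg : gl ∈ pvCells '0' grid) : pvD grid r c ≤ pvDist (r, c) gl := by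
  obtain ⟨r1, c1⟩ := gl
  rw [pvCells_mem] at hg
  obtain ⟨hr1, hc1⟩ := hg
  have hlen : c1 < (grid.getD r1 "").toList.length := (List.getElem?_eq_some_iff.mp hc1).1
  have hW1 : (grid.getD r1 "").length ≤ pvW grid := pvRowLen_le_W grid r1 hr1
  have hWl : (grid.getD r1 "").toList.length = (grid.getD r1 "").length := by simp
  have h1 : pvD grid r c ≤
      pvMinIdx (fun c' => pvBase grid r1 c' + |(c:Int) - (c':Int)|) (pvW grid - 1)
        + |(r:Int) - (r1:Int)| := pvMinIdx_le _ (by omega)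
  have h2 : pvMinIdx (fun c' => pvBase grid r1 c' + |(c:Int) - (c':Int)|) (pvW grid - 1)
      ≤ pvBase grid r1 c1 + |(c:Int) - (c1:Int)| := pvMinIdx_le _ (by omega)
  have hb : pvBase grid r1 c1 = 0 := by unfold pvBase; rw [if_pos hc1]
  unfold pvDist
  simp only
  rw [hb] at h2
  have := add_le_add_right h2 (|(r:Int) - (r1:Int)|)
  omega

theorem pvD_cases (grid : List String) (r c : ℕ) :
    (∃ gl ∈ pvCells '0' grid, pvD grid r c = pvDist (r, c) gl) ∨ pvINF grid ≤ pvD grid r c := by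
  obtain ⟨r0, hr0, he0⟩ := pvMinIdx_exists
    (fun r' => pvMinIdx (fun c' => pvBase grid r' c' + |(c:Int) - (c':Int)|) (pvW grid - 1)
      + |(r:Int) - (r':Int)|) (grid.length - 1)
  obtain ⟨c0, hc0, he1⟩ := pvMinIdx_exists
    (fun c' => pvBase grid r0 c' + |(c:Int) - (c':Int)|) (pvW grid - 1)
  have hD : pvD grid r c = pvBase grid r0 c0 + |(c:Int) - (c0:Int)| + |(r:Int) - (r0:Int)| := by
    unfold pvD
    rw [he0, he1]
  by_cases hg : (grid.getD r0 "").toList[c0]? = some '0'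
  · by_cases hr0' : r0 < grid.length
    · left
      refine ⟨(r0, c0), (pvCells_mem '0' grid r0 c0).mpr ⟨hr0', hg⟩, ?_⟩
      have hb : pvBase grid r0 c0 = 0 := by unfold pvBase; rw [if_pos hg]
      rw [hD, hb]
      unfold pvDist
      simp only
      omega
    · -- r0 ≤ grid.length - 1 and ¬ r0 < grid.length only if grid = [], where getD "" has no chars
      exfalso
      have : grid.length = 0 := by omega
      have hnil : grid.getD r0 "" = "" := by
        cases grid with
        | nil => rfl
        | cons a l => simp at this
      rw [hnil] at hg
      simp at hg
  · right
    have hb : pvBase grid r0 c0 = pvINF grid := by unfold pvBase; rw [if_neg hg]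
    rw [hD, hb]
    have := abs_nonneg ((c:Int) - (c0:Int))
    have := abs_nonneg ((r:Int) - (r0:Int))
    omega

theorem pvD_inf_of_no_goals (grid : List String) (r c : ℕ)
    (h : pvCells '0' grid = []) : pvINF grid ≤ pvD grid r c := by
  rcases pvD_cases grid r c with ⟨gl, hgl, -⟩ | hge
  · rw [h] at hgl; simp at hgl
  · exact hge

-- the guarded transform value is exactly A's best-goal value
theorem pvCellVal (grid : List String) (r c : ℕ) (hmem : (r, c) ∈ pvCells '3' grid) :
    (if ((pvCols grid).getD c []).getD r 0 < pvINF grid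
      then ((pvCols grid).getD c []).getD r 0 else -1) = pvBest (pvCells '0' grid) (r, c) := by
  obtain ⟨hr, hc3⟩ := (pvCells_mem '3' grid r c).mp hmem
  have hlen : c < (grid.getD r "").toList.length := (List.getElem?_eq_some_iff.mp hc3).1
  have hW1 : (grid.getD r "").length ≤ pvW grid := pvRowLen_le_W grid r hr
  have hWl : (grid.getD r "").toList.length = (grid.getD r "").length := by simp
  have hcW : c < pvW grid := by omega
  rw [pvV_eq grid r c hr hcW]
  cases hgoals : pvCells '0' grid with
  | nil =>
    rw [if_neg (by have := pvD_inf_of_no_goals grid r c hgoals; omega)]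
    rfl
  | cons g gs =>
    rw [pvBest_cons]
    have hmap : gs.foldl (fun m gl => min m (pvDist (r,c) gl)) (pvDist (r,c) g)
        = (gs.map (pvDist (r,c))).foldl min (pvDist (r,c) g) := by
      rw [List.foldl_map]
    have hle := PySem.List.foldl_min_le (gs.map (pvDist (r,c))) (pvDist (r,c) g)
    have hmm := PySem.List.foldl_min_mem (gs.map (pvDist (r,c))) (pvDist (r,c) g)
    set M := (gs.map (pvDist (r,c))).foldl min (pvDist (r,c) g) with hM
    have hMd : ∃ gl ∈ g :: gs, M = pvDist (r,c) gl := by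
      rcases hmm with h | h
      · exact ⟨g, by simp, h⟩
      · rcases List.mem_map.mp h with ⟨gl, hgl, he⟩
        exact ⟨gl, by simp [hgl], he.symm⟩
    have hMle : ∀ gl ∈ g :: gs, M ≤ pvDist (r,c) gl := by
      intro gl hgl
      rcases List.mem_cons.mp hgl with rfl | hgl'
      · exact hle.1
      · exact hle.2 _ (List.mem_map_of_mem hgl')
    obtain ⟨glm, hglm, hglme⟩ := hMd
    have hDle : pvD grid r c ≤ M := by
      rw [hglme]
      exact pvD_le grid r c hr glm (hgoals ▸ hglm)
    have hMleD : M ≤ pvD grid r c := by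
      rcases pvD_cases grid r c with ⟨gl, hgl, he⟩ | hge
      · rw [he]
        exact hMle gl (by rwa [hgoals] at hgl)
      · have : M < pvINF grid := by
          rw [hglme]
          exact pvGoal_lt grid r c hr hcW glm (hgoals ▸ hglm)
        omega
    have hDM : pvD grid r c = M := le_antisymm hDle hMleD
    have hlt : pvD grid r c < pvINF grid := by
      rw [hDM, hglme]
      exact pvGoal_lt grid r c hr hcW glm (hgoals ▸ hglm)
    rw [if_pos hlt, hDM, hmap]

-- the summation loops of B walk exactly the '3'-cells
theorem pvSumRow (l : List Char) (k r : ℕ) (T : ℕ → ℕ → Int) (acc : Int) :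
    (PySem.List.enumerate l (k:Int)).foldl (fun t cc =>
        if cc.2 = '3' then t + T r cc.1.toNat else t) acc
      = acc + ((pvIdxF '3' l k).map (fun c => T r c)).sum := by
  induction l generalizing k acc with
  | nil => simp [pvIdxF]
  | cons x xs ih =>
    rw [PySem.List.enumerate_cons]
    have hk1 : (k:Int) + 1 = ((k+1 : ℕ) : Int) := by push_cast; ring
    simp only [List.foldl_cons, hk1]
    by_cases h3 : x = '3'
    · rw [if_pos h3, ih (k+1)]
      simp [pvIdxF, h3]
      omega
    · rw [if_neg h3, ih (k+1)]
      simp [pvIdxF, h3]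

theorem pvSumGrid (grid : List String) (k : ℕ) (T : ℕ → ℕ → Int) (acc : Int) :
    (PySem.List.enumerate grid (k:Int)).foldl (fun t rrow =>
        (PySem.List.enumerate rrow.2.toList).foldl (fun t cc =>
          if cc.2 = '3' then t + T rrow.1.toNat cc.1.toNat else t) t) acc
      = acc + ((pvCellsFrom '3' grid k).map (fun p => T p.1 p.2)).sum := by
  induction grid generalizing k acc with
  | nil => simp [pvCellsFrom]
  | cons row rest ih =>
    rw [PySem.List.enumerate_cons]
    have hk1 : (k:Int) + 1 = ((k+1 : ℕ) : Int) := by push_cast; ring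
    simp only [List.foldl_cons, hk1]
    have h0 : ((0:ℕ):Int) = 0 := by norm_num
    rw [show (PySem.List.enumerate row.toList 0) = (PySem.List.enumerate row.toList ((0:ℕ):Int)) by rw [h0]]
    rw [pvSumRow row.toList 0 ((k:Int)).toNat T acc, ih (k+1)]
    simp only [pvCellsFrom, List.map_append, List.map_map, List.sum_append, Int.toNat_natCast]
    have : ((pvIdxF '3' row.toList 0).map ((fun p => T p.1 p.2) ∘ (fun c => (k, c))))
        = (pvIdxF '3' row.toList 0).map (fun c => T k c) := rfl
    rw [this]
    omega

theorem pvBval_eq (grid : List String) : pvBval grid = pvSval grid := by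
  unfold pvBval
  have h0 : ((0:ℕ):Int) = 0 := by norm_num
  rw [show (PySem.List.enumerate grid) = (PySem.List.enumerate grid ((0:ℕ):Int)) by rw [h0]]
  rw [pvSumGrid grid 0 (fun r c =>
    if ((pvCols grid).getD c []).getD r 0 < pvINF grid
      then ((pvCols grid).getD c []).getD r 0 else -1) 0, zero_add]
  unfold pvSval
  rw [PySem.List.foldl_add ((pvCells '3' grid)) (fun bx => pvBest (pvCells '0' grid) bx) 0, zero_add]
  apply congrArg
  apply List.map_congr_left
  intro p hp
  obtain ⟨r, c⟩ := p
  exact pvCellVal grid r c hp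

-- ===== B-side: the port of B computes map pvSval =====
theorem B_eq_sval (frontier : List (List String)) :
    manhattan_distance_frontier_alt frontier = frontier.map pvSval := by
  have h1 : manhattan_distance_frontier_alt frontier
      = frontier.foldl (fun acc grid => acc ++ [pvBval grid]) [] := rfl
  rw [h1, PySem.List.foldl_append_singleton_eq_map, List.nil_append]
  exact List.map_congr_left (fun grid _ => pvBval_eq grid)

-- ===== VERDICT (by name: the statement is the Claim_ definition above) =====
theorem manhattan_distance_frontier_spec : Claim_equal_manhattan_distance_frontier := by
  intro frontier _
  unfold Spec_manhattan_distance_frontier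
  rw [A_eq_sval, B_eq_sval]
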